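-- pv_equiv track=rewrite | github.com/RBVI/ChimeraX | src/core/xdg.py | arg_quote
-- ===== SOURCE A (Python) =====
-- reserved_char = """ \t\n"'\\><~|&;$*?#()`"""
--
-- def arg_quote(arg):
--     has_reserved = any(True for ch in arg if ch in reserved_char)
--     if not has_reserved:
--         return arg
--     result = '"'
--     for ch in arg:
--         if ch in '"`$\\':
--             result += '\\'
--         result += ch
--     result += '"'
--     return result
-- ===== SOURCE B (Python) =====
-- _RESERVED = set(""" \t\n"'\\><~|&;$*?#()`""")
--
-- def arg_quote(arg):
--     if not (set(arg) & _RESERVED):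
--         return arg
--     body = (arg.replace('\\', '\\\\')
--                .replace('"', '\\"')
--                .replace('`', '\\`')
--                .replace('$', '\\$'))
--     return '"' + body + '"'
-- ===== Notes on version B (the rewrite author's own statement) =====
-- stated objective: alternative
-- what changed: Replaces A's single per-character accumulation loop with a set-intersection guard (set(arg) & reserved set) followed by four staged whole-string str.replace passes that escape backslash first and then ", `, $, wrapped in double quotes.
import Mathlib
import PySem

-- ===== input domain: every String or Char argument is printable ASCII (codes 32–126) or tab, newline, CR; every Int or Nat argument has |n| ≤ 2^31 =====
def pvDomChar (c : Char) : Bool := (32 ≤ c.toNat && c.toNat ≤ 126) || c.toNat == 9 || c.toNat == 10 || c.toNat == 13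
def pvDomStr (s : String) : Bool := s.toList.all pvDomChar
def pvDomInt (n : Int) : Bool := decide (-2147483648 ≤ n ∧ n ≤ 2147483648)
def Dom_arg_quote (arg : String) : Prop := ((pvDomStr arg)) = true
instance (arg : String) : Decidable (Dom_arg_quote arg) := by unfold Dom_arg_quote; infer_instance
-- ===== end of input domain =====

-- B replaces A's single per-character accumulation loop with a set-intersection guard and
-- four staged whole-string replace passes (backslash first, then " ` $); same cost, different decomposition.

-- ===== PORT A =====
-- reserved_char = " \t\n\"'\\><~|&;$*?#()`"  (module constant shared by both versions)
def pvReservedChars : List Char := [' ', '\t', '\n', '"', '\'', '\\', '>', '<', '~', '|', '&', ';', '$', '*', '?', '#', '(', ')', '`']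

def arg_quote (arg : String) : String :=
  -- has_reserved = any(True for ch in arg if ch in reserved_char)
  let has_reserved := arg.toList.any (fun ch => pvReservedChars.contains ch)
  if !has_reserved then arg
  else
    -- result = '"' ; for ch in arg: if ch in '"`$\\': result += '\\' ; result += ch
    let result := arg.toList.foldl
      (fun r ch => (if ['"', '`', '$', '\\'].contains ch then r.push '\\' else r).push ch) "\""
    result.push '"'

-- ===== PORT B =====
-- _RESERVED = set(reserved chars)
def pvReservedSet : PySem.Set Char := PySem.Set.ofList pvReservedChars

def arg_quote_alt (arg : String) : String :=
  -- if not (set(arg) & _RESERVED): return arg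
  if (PySem.Set.inter (PySem.Set.ofList arg.toList) pvReservedSet).isEmpty then arg
  else
    -- body = arg.replace('\\','\\\\').replace('"','\\"').replace('`','\\`').replace('$','\\$')
    -- (PySem.Str.replace is the String wrapper of PySem.Chars.replace; we port on the char-list side)
    let body := PySem.Chars.replace
      (PySem.Chars.replace
        (PySem.Chars.replace
          (PySem.Chars.replace arg.toList ['\\'] ['\\', '\\'])
          ['"'] ['\\', '"'])
        ['`'] ['\\', '`'])
      ['$'] ['\\', '$']
    -- return '"' + body + '"'
    String.ofList ('"' :: body ++ ['"'])

-- ===== PRECONDITION & SPEC =====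
def Spec_arg_quote (arg : String) (out : String) : Prop := out = arg_quote_alt arg
instance (arg : String) (out : String) : Decidable (Spec_arg_quote arg out) := by unfold Spec_arg_quote; infer_instance

-- ===== CLAIM (what is proved, stated in full; the proofs are below) =====
def Claim_equal_arg_quote : Prop := ∀ (arg : String), Dom_arg_quote arg → Spec_arg_quote arg (arg_quote arg)

-- ===== LEMMAS AND PROOFS =====
-- the per-character escaping of " ` $ \ as a flatMap (what both sides compute on the interior)
def pvEscSub (cs : List Char) : List Char :=
  cs.flatMap (fun ch => if ['"', '`', '$', '\\'].contains ch then ['\\', ch] else [ch])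

-- replacing a SINGLE-character pattern is a flatMap (by induction on replace's fuel)
theorem pv_replace_go_single (c : Char) (r : List Char) (fuel : Nat) (l acc : List Char)
    (h : l.length ≤ fuel) :
    PySem.Chars.replace.go [c] r fuel l acc
      = acc.reverse ++ l.flatMap (fun ch => if ch = c then r else [ch]) := by
  induction fuel generalizing l acc with
  | zero =>
    have : l = [] := List.eq_nil_of_length_eq_zero (Nat.le_zero.mp h)
    subst this
    simp [PySem.Chars.replace.go]
  | succ n ih =>
    cases l with
    | nil => simp [PySem.Chars.replace.go]
    | cons a t =>
      simp only [PySem.Chars.replace.go]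
      by_cases hac : a = c
      · subst hac
        have hp : List.isPrefixOf [a] (a :: t) = true := by simp [List.isPrefixOf]
        simp only [hp, if_pos]
        rw [ih _ _ (by simpa using h)]
        simp
      · have hp : List.isPrefixOf [c] (a :: t) = false := by
          simp [List.isPrefixOf]
          intro hh
          exact absurd hh.symm hac
        simp only [hp, Bool.false_eq_true, if_false]
        rw [ih t (a :: acc) (by simpa using h)]
        simp [hac]

theorem pv_replace_single (c : Char) (r : List Char) (cs : List Char) :
    PySem.Chars.replace cs [c] r = cs.flatMap (fun ch => if ch = c then r else [ch]) := by
  simp only [PySem.Chars.replace, List.isEmpty_cons, Bool.false_eq_true, if_false]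
  exact pv_replace_go_single c r cs.length cs [] (le_refl _)

-- the four staged single-character replaces compose to the one-shot escape flatMap
theorem pv_esc_head (a : Char) :
    List.flatMap (fun ch => if ch = '$' then ['\\', '$'] else [ch])
      (List.flatMap (fun ch => if ch = '`' then ['\\', '`'] else [ch])
        (List.flatMap (fun ch => if ch = '"' then ['\\', '"'] else [ch])
          (if a = '\\' then ['\\', '\\'] else [a])))
      = if ['"', '`', '$', '\\'].contains a then ['\\', a] else [a] := by
  by_cases h1 : a = '\\'
  · subst h1; decide
  by_cases h2 : a = '"'
  · subst h2; decide
  by_cases h3 : a = '`'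
  · subst h3; decide
  by_cases h4 : a = '$'
  · subst h4; decide
  simp [h1, h2, h3, h4]

theorem pv_chain_eq_escSub (cs : List Char) :
    PySem.Chars.replace
      (PySem.Chars.replace
        (PySem.Chars.replace
          (PySem.Chars.replace cs ['\\'] ['\\', '\\'])
          ['"'] ['\\', '"'])
        ['`'] ['\\', '`'])
      ['$'] ['\\', '$'] = pvEscSub cs := by
  simp only [pv_replace_single]
  induction cs with
  | nil => simp [pvEscSub]
  | cons a t ih =>
    simp only [pvEscSub, List.flatMap_cons, List.flatMap_append] at ih ⊢
    exact congrArg₂ (· ++ ·) (pv_esc_head a) ih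

-- A's accumulation loop, started from any string s, appends exactly the escaped characters
theorem pv_foldl_eq_escSub (cs : List Char) (s : String) :
    (cs.foldl (fun r ch => (if ['"', '`', '$', '\\'].contains ch then r.push '\\' else r).push ch) s).toList
      = s.toList ++ pvEscSub cs := by
  induction cs generalizing s with
  | nil => simp [pvEscSub]
  | cons c cs ih =>
    simp only [List.foldl_cons, ih, pvEscSub, List.flatMap_cons]
    split <;> simp [String.toList_push]

-- the two guards agree: the set intersection is empty iff no char of arg is reserved
theorem pv_guard_eq (arg : String) :
    (PySem.Set.inter (PySem.Set.ofList arg.toList) pvReservedSet).isEmpty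
      = !(arg.toList.any (fun ch => pvReservedChars.contains ch)) := by
  by_cases h : arg.toList.any (fun ch => pvReservedChars.contains ch)
  · obtain ⟨ch, hmem, hres⟩ := List.any_eq_true.mp h
    have hin : ch ∈ PySem.Set.inter (PySem.Set.ofList arg.toList) pvReservedSet := by
      rw [PySem.Set.mem_inter]
      unfold pvReservedSet
      rw [PySem.Set.mem_ofList, PySem.Set.mem_ofList]
      exact ⟨hmem, by simpa using hres⟩
    rw [h, Bool.not_true]
    cases hl : PySem.Set.inter (PySem.Set.ofList arg.toList) pvReservedSet with
    | nil => rw [hl] at hin; cases hin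
    | cons b bs => rfl
  · have hnil : PySem.Set.inter (PySem.Set.ofList arg.toList) pvReservedSet = [] := by
      rw [List.eq_nil_iff_forall_not_mem]
      intro ch hch
      rw [PySem.Set.mem_inter] at hch
      unfold pvReservedSet at hch
      rw [PySem.Set.mem_ofList, PySem.Set.mem_ofList] at hch
      exact h (List.any_eq_true.mpr ⟨ch, hch.1, by simpa using hch.2⟩)
    rw [hnil, Bool.eq_false_iff.mpr h, Bool.not_false]
    rfl

-- ===== VERDICT (by name: the statement is the Claim_ definition above) =====
theorem arg_quote_spec : Claim_equal_arg_quote := by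
  intro arg _
  unfold Spec_arg_quote arg_quote arg_quote_alt
  rw [pv_guard_eq]
  by_cases h : arg.toList.any (fun ch => pvReservedChars.contains ch)
  · simp only [h, Bool.not_true, Bool.false_eq_true, if_false]
    apply String.toList_inj.mp
    rw [String.toList_push, pv_foldl_eq_escSub, pv_chain_eq_escSub]
    simp
  · simp only [h, Bool.not_false, if_true]
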